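-- pv_equiv track=rewrite | github.com/wil953742/Algorithm-Study | 실리콘/2.py | solution
-- ===== SOURCE A (Python) =====
-- def solution(names, homes, grades):
--   answer = [0]*len(names)
--
--   dict = []
--   for i in range(len(names)):
--     x, y = homes[i]
--     dist = (x*x) + (y*y)
--     num = grades[i] // 1
--
--     dict.append([names[i], dist, num, i])
--
--   dict.sort(key=lambda x: (-x[2], -x[1], x[0]))
--
--   for i in range(len(names)):
--     answer[dict[i][3]] = i+1
--
--   return answer
-- ===== SOURCE B (Python) =====
-- def solution(names, homes, grades):
--     n = len(names)
--     keys = [(-(grades[i] // 1), -(homes[i][0] ** 2 + homes[i][1] ** 2), names[i])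
--             for i in range(n)]
--     return [1 + sum(1 for j in range(n) if (keys[j], j) < (keys[i], i))
--             for i in range(n)]
-- ===== Notes on version B (the rewrite author's own statement) =====
-- stated objective: alternative
-- what changed: Replaced A's build-records / stable-sort / write-back-by-stored-index pipeline with a direct rank computation: each answer is 1 + the number of indices whose (key, index) tuple is lexicographically smaller, reproducing the stable sort's tie-breaking by appending the original index to the key.
import Mathlib
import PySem

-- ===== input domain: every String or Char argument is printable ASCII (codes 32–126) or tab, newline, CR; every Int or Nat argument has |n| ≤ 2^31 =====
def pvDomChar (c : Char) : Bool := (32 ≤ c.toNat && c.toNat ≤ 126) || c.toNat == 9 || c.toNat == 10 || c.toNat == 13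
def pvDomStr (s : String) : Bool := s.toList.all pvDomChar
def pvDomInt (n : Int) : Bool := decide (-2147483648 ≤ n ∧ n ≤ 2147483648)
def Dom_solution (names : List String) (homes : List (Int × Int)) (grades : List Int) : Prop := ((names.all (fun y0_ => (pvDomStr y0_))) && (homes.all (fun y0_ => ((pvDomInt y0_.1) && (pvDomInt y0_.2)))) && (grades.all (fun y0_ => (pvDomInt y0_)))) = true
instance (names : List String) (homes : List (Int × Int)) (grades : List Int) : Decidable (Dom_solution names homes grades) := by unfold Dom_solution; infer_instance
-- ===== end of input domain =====

-- B replaces A's build-list / stable-sort / write-back-by-stored-index pipeline with a direct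
-- rank computation: each person's answer is 1 + the number of people whose (key, index) tuple is
-- lexicographically smaller (objective: alternative; same results, no speed claim).

-- ===== PORT A =====
-- A-side helper: the sort key of Python's lambda x: (-x[2], -x[1], x[0]) — a lexicographic tuple.
def pvKeyA (x : String × Int × Int × Int) : Lex (Int × Lex (Int × String)) :=
  toLex (-x.2.2.1, toLex (-x.2.1, x.1))

def solution (names : List String) (homes : List (Int × Int)) (grades : List Int) : List Int :=
  let answer : List Int := List.replicate names.length 0
  let d : List (String × Int × Int × Int) :=
    (List.range names.length).foldl (fun acc i =>
      let xy := homes.getD i (0, 0)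
      let dist := xy.1 * xy.1 + xy.2 * xy.2
      let num := PySem.Int.floordiv (grades.getD i 0) 1
      acc ++ [(names.getD i "", dist, num, (i : Int))]) []
  let d := PySem.List.sorted d pvKeyA
  (List.range names.length).foldl (fun ans i =>
    PySem.List.pySetD ans (d.getD i ("", 0, 0, 0)).2.2.2 ((i : Int) + 1)) answer

-- ===== PORT B =====
-- B-side helper: the key tuple (-(grades[i]//1), -(homes[i][0]**2+homes[i][1]**2), names[i]).
def pvKeyB (names : List String) (homes : List (Int × Int)) (grades : List Int) (i : Nat) :
    Lex (Int × Lex (Int × String)) :=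
  toLex (-(PySem.Int.floordiv (grades.getD i 0) 1),
    toLex (-((homes.getD i (0, 0)).1 ^ 2 + (homes.getD i (0, 0)).2 ^ 2), names.getD i ""))

def solution_alt (names : List String) (homes : List (Int × Int)) (grades : List Int) : List Int :=
  let n := names.length
  let keys := (List.range n).map (pvKeyB names homes grades)
  (List.range n).map (fun i =>
    (1 : Int) + (((List.range n).filter (fun j =>
      decide (toLex (keys.getD j (toLex (0, toLex (0, ""))), j)
            < toLex (keys.getD i (toLex (0, toLex (0, ""))), i)))).length : Int))

-- ===== PRECONDITION & SPEC =====
-- Pre_ excludes exactly the inputs where Python A raises IndexError (homes or grades shorter than names).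
def Pre_solution (names : List String) (homes : List (Int × Int)) (grades : List Int) : Prop :=
  names.length ≤ homes.length ∧ names.length ≤ grades.length
instance (names : List String) (homes : List (Int × Int)) (grades : List Int) : Decidable (Pre_solution names homes grades) := by unfold Pre_solution; infer_instance
def pvWitness_solution : List String × (List (Int × Int)) × List Int :=
  (["bob", "al"], [(1, 2), (0, 1)], [3, 3])

def Spec_solution (names : List String) (homes : List (Int × Int)) (grades : List Int) (out : List Int) : Prop := out = solution_alt names homes grades
instance (names : List String) (homes : List (Int × Int)) (grades : List Int) (out : List Int) : Decidable (Spec_solution names homes grades out) := by unfold Spec_solution; infer_instance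

-- ===== CLAIM (what is proved, stated in full; the proofs are below) =====
def Claim_equal_solution : Prop := ∀ (names : List String) (homes : List (Int × Int)) (grades : List Int), Dom_solution names homes grades → Pre_solution names homes grades → Spec_solution names homes grades (solution names homes grades)

-- ===== LEMMAS AND PROOFS =====

-- the record A builds for index i
def pvEntry (names : List String) (homes : List (Int × Int)) (grades : List Int) (i : Nat) :
    String × Int × Int × Int :=
  (names.getD i "",
   (homes.getD i (0, 0)).1 * (homes.getD i (0, 0)).1 + (homes.getD i (0, 0)).2 * (homes.getD i (0, 0)).2,
   PySem.Int.floordiv (grades.getD i 0) 1,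
   (i : Int))

def pvIdx (x : String × Int × Int × Int) : Nat := x.2.2.2.toNat

-- full key: sort key extended with the original index (the stable sort's implicit tiebreaker)
def pvFull (x : String × Int × Int × Int) : Lex (Lex (Int × Lex (Int × String)) × Nat) :=
  toLex (pvKeyA x, pvIdx x)

theorem pvFull_lt_iff (a b : String × Int × Int × Int) :
    pvFull a < pvFull b ↔ pvKeyA a < pvKeyA b ∨ (pvKeyA a = pvKeyA b ∧ pvIdx a < pvIdx b) := by
  simp [pvFull, Prod.Lex.lt_iff]

theorem pv_insertBy_pairwise (x : String × Int × Int × Int) (acc : List (String × Int × Int × Int))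
    (h : acc.Pairwise (fun a b => pvFull a < pvFull b))
    (hidx : ∀ a ∈ acc, pvIdx a < pvIdx x) :
    (PySem.List.insertBy (fun a b => decide (pvKeyA a < pvKeyA b)) x acc).Pairwise
      (fun a b => pvFull a < pvFull b) := by
  induction acc with
  | nil => simp [PySem.List.insertBy]
  | cons y ys ih =>
    rcases List.pairwise_cons.mp h with ⟨hy, hys⟩
    by_cases hlt : pvKeyA x < pvKeyA y
    · have hstep : PySem.List.insertBy (fun a b => decide (pvKeyA a < pvKeyA b)) x (y :: ys)
          = x :: y :: ys := by simp [PySem.List.insertBy, hlt]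
      rw [hstep]
      refine List.pairwise_cons.mpr ⟨?_, h⟩
      intro z hz
      rcases List.mem_cons.mp hz with hz | hz
      · rw [hz]; exact (pvFull_lt_iff x y).mpr (Or.inl hlt)
      · exact lt_trans ((pvFull_lt_iff x y).mpr (Or.inl hlt)) (hy z hz)
    · have hstep : PySem.List.insertBy (fun a b => decide (pvKeyA a < pvKeyA b)) x (y :: ys)
          = y :: PySem.List.insertBy (fun a b => decide (pvKeyA a < pvKeyA b)) x ys := by
        simp [PySem.List.insertBy, hlt]
      rw [hstep]
      refine List.pairwise_cons.mpr ⟨?_, ih hys (fun a ha => hidx a (List.mem_cons_of_mem y ha))⟩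
      intro z hz
      rcases (PySem.List.mem_insertBy _ x z ys).mp hz with hz | hz
      · rw [hz]
        rcases lt_or_eq_of_le (le_of_not_gt hlt) with hk | hk
        · exact (pvFull_lt_iff y x).mpr (Or.inl hk)
        · exact (pvFull_lt_iff y x).mpr (Or.inr ⟨hk, hidx y List.mem_cons_self⟩)
      · exact hy z hz

theorem pv_foldl_insertBy_pairwise (xs acc : List (String × Int × Int × Int))
    (hacc : acc.Pairwise (fun a b => pvFull a < pvFull b))
    (hsep : ∀ a ∈ acc, ∀ b ∈ xs, pvIdx a < pvIdx b)
    (hxs : xs.Pairwise (fun a b => pvIdx a < pvIdx b)) :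
    (xs.foldl (fun acc x => PySem.List.insertBy (fun a b => decide (pvKeyA a < pvKeyA b)) x acc) acc).Pairwise
      (fun a b => pvFull a < pvFull b) := by
  induction xs generalizing acc with
  | nil => exact hacc
  | cons x t ih =>
    rcases List.pairwise_cons.mp hxs with ⟨hx, ht⟩
    refine ih _ ?_ ?_ ht
    · exact pv_insertBy_pairwise x acc hacc (fun a ha => hsep a ha x List.mem_cons_self)
    · intro a ha b hb
      rcases (PySem.List.mem_insertBy _ x a acc).mp ha with ha | ha
      · subst ha; exact hx b hb
      · exact hsep a ha b (List.mem_cons_of_mem x hb)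

-- position in a strictly pvFull-increasing list = number of strictly smaller elements
theorem pv_countP_pos (l : List (String × Int × Int × Int))
    (h : l.Pairwise (fun a b => pvFull a < pvFull b)) (p : Nat) (hp : p < l.length)
    (c : String × Int × Int × Int) (hc : l[p] = c) :
    l.countP (fun y => decide (pvFull y < pvFull c)) = p := by
  induction l generalizing p with
  | nil => simp at hp
  | cons x t ih =>
    rcases List.pairwise_cons.mp h with ⟨hx, ht⟩
    cases p with
    | zero =>
      have hxc : x = c := hc
      subst hxc
      rw [List.countP_cons]
      have h0 : (decide (pvFull x < pvFull x)) = false := by simp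
      have h1 : t.countP (fun y => decide (pvFull y < pvFull x)) = 0 := by
        refine List.countP_eq_zero.mpr ?_
        intro y hy
        simp only [decide_eq_true_eq]
        exact not_lt_of_gt (hx y hy)
      rw [h0, h1]
      simp
    | succ q =>
      have hq : q < t.length := by simpa using hp
      have hc' : t[q] = c := by simpa using hc
      have hmem : c ∈ t := hc' ▸ List.getElem_mem hq
      rw [List.countP_cons]
      have h1 : (decide (pvFull x < pvFull c)) = true := by
        simp only [decide_eq_true_eq]
        exact hx c hmem
      rw [h1, ih ht q hq hc']
      simp

-- a foldl of writes: length is kept, unwritten positions keep their value, written positions get theirs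
theorem pv_setfold_length (l : List (Nat × Int)) (ans : List Int) :
    (l.foldl (fun a p => a.set p.1 p.2) ans).length = ans.length := by
  induction l generalizing ans with
  | nil => rfl
  | cons x t ih => simp [ih]

theorem pv_setfold_not_mem (l : List (Nat × Int)) (ans : List Int) (i : Nat) (d : Int)
    (h : ∀ p ∈ l, p.1 ≠ i) :
    (l.foldl (fun a p => a.set p.1 p.2) ans).getD i d = ans.getD i d := by
  induction l generalizing ans with
  | nil => rfl
  | cons x t ih =>
    have hne : x.1 ≠ i := h x List.mem_cons_self
    rw [List.foldl_cons, ih _ (fun p hp => h p (List.mem_cons_of_mem x hp))]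
    simp [List.getD_eq_getElem?_getD, List.getElem?_set_ne hne]

theorem pv_setfold_mem (l : List (Nat × Int)) (ans : List Int) (i : Nat) (v : Int) (d : Int)
    (hn : (l.map Prod.fst).Nodup) (hm : (i, v) ∈ l) (hi : i < ans.length) :
    (l.foldl (fun a p => a.set p.1 p.2) ans).getD i d = v := by
  induction l generalizing ans with
  | nil => simp at hm
  | cons x t ih =>
    simp only [List.map_cons, List.nodup_cons] at hn
    rcases List.mem_cons.mp hm with hm | hm
    · rw [List.foldl_cons]
      have hnot : ∀ p ∈ t, p.1 ≠ i := by
        intro p hp hpi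
        refine hn.1 ?_
        rw [← hm]
        simpa [hpi] using List.mem_map_of_mem (f := Prod.fst) hp
      rw [pv_setfold_not_mem t _ i d hnot, ← hm]
      rw [List.getD_eq_getElem _ _ (by simpa using hi)]
      exact List.getElem_set_self _
    · exact ih _ hn.2 hm (by simpa using hi)

-- turn a fold over range-with-getD into a fold over zipIdx
theorem pv_foldl_range_getD {α β : Type} (l : List α) (dflt : α) (g : β → α → Nat → β) :
    ∀ (k : Nat) (init : β),
      (List.range l.length).foldl (fun a i => g a (l.getD i dflt) (k + i)) init
        = (l.zipIdx k).foldl (fun a p => g a p.1 p.2) init := by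
  induction l with
  | nil => intro k init; rfl
  | cons x t ih =>
    intro k init
    rw [List.length_cons, List.range_succ_eq_map, List.foldl_cons, List.foldl_map,
      List.zipIdx_cons, List.foldl_cons]
    simp only [List.getD_cons_zero, List.getD_cons_succ, Nat.add_zero]
    rw [← ih (k + 1) (g init x k)]
    apply PySem.List.foldl_congr_mem
    intro acc i _
    congr 1
    omega

theorem solution_spec_aux (names : List String) (homes : List (Int × Int)) (grades : List Int) :
    solution names homes grades = solution_alt names homes grades := by
  set n := names.length with hn
  set d : List (String × Int × Int × Int) := (List.range n).map (pvEntry names homes grades) with hd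
  set s : List (String × Int × Int × Int) := PySem.List.sorted d pvKeyA with hs
  have hbuild :
      (List.range n).foldl (fun acc i =>
        acc ++ [(names.getD i "",
          (homes.getD i (0, 0)).1 * (homes.getD i (0, 0)).1 + (homes.getD i (0, 0)).2 * (homes.getD i (0, 0)).2,
          PySem.Int.floordiv (grades.getD i 0) 1, (i : Int))]) ([] : List (String × Int × Int × Int))
        = d := by
    exact (PySem.List.foldl_append_singleton_eq_map
      (pvEntry names homes grades) (List.range n) []).trans (List.nil_append _)
  have hA : solution names homes grades
      = (List.range n).foldl (fun ans i =>
          PySem.List.pySetD ans (s.getD i ("", 0, 0, 0)).2.2.2 ((i : Int) + 1))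
          (List.replicate n (0 : Int)) := by
    show (List.range n).foldl (fun ans i =>
        PySem.List.pySetD ans
          ((PySem.List.sorted ((List.range n).foldl (fun acc i =>
            acc ++ [(names.getD i "",
              (homes.getD i (0, 0)).1 * (homes.getD i (0, 0)).1 + (homes.getD i (0, 0)).2 * (homes.getD i (0, 0)).2,
              PySem.Int.floordiv (grades.getD i 0) 1, (i : Int))]) []) pvKeyA).getD i ("", 0, 0, 0)).2.2.2
          ((i : Int) + 1)) (List.replicate n (0 : Int)) = _
    rw [hbuild]
  have hsl : s.length = n := by
    rw [hs, PySem.List.length_sorted, hd, List.length_map, List.length_range]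
  have hperm : s.Perm d := PySem.List.sorted_perm d pvKeyA false
  have hidxe : ∀ j : Nat, pvIdx (pvEntry names homes grades j) = j := by
    intro j; simp [pvIdx, pvEntry]
  -- s is strictly increasing in the full key (stability of the sort)
  have hpair : s.Pairwise (fun a b => pvFull a < pvFull b) := by
    rw [hs, PySem.List.sorted_eq_foldl_insertBy]
    refine pv_foldl_insertBy_pairwise d [] List.Pairwise.nil (by simp) ?_
    rw [hd, List.pairwise_map]
    refine List.Pairwise.imp ?_ (List.pairwise_lt_range (n := n))
    intro a b hab
    rw [hidxe, hidxe]; exact hab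
  have hmem_s : ∀ e ∈ s, ∃ j, j < n ∧ e = pvEntry names homes grades j := by
    intro e he
    have hed : e ∈ d := hperm.mem_iff.mp he
    rw [hd] at hed
    rcases List.mem_map.mp hed with ⟨j, hj, hje⟩
    exact ⟨j, List.mem_range.mp hj, hje.symm⟩
  -- A's second loop, as a fold of Nat-indexed writes
  set wl : List (Nat × Int) := s.zipIdx.map (fun p => (pvIdx p.1, (p.2 : Int) + 1)) with hwl
  have hstep2 :
      (List.range n).foldl (fun ans i =>
        PySem.List.pySetD ans (s.getD i ("", 0, 0, 0)).2.2.2 ((i : Int) + 1))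
        (List.replicate n (0 : Int))
      = wl.foldl (fun a p => a.set p.1 p.2) (List.replicate n (0 : Int)) := by
    rw [show List.range n = List.range s.length from by rw [hsl]]
    have h0 := pv_foldl_range_getD s ("", 0, 0, 0)
      (fun a e i => PySem.List.pySetD a e.2.2.2 ((i : Int) + 1)) 0 (List.replicate n (0 : Int))
    simp only [Nat.zero_add] at h0
    rw [h0, hwl, List.foldl_map]
    apply PySem.List.foldl_congr_mem
    intro acc p hp
    obtain ⟨e, i⟩ := p
    have h3 := List.mem_zipIdx hp
    have he : e ∈ s := by
      rw [h3.2.2]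
      exact List.getElem_mem (by omega)
    rcases hmem_s e he with ⟨j, _, hj⟩
    have h0le : (0 : Int) ≤ e.2.2.2 := by rw [hj]; simp [pvEntry]
    rw [PySem.List.pySetD_of_nonneg _ _ h0le]
    rfl
  -- first components of wl are a permutation of range n, hence nodup
  have hwlnodup : (wl.map Prod.fst).Nodup := by
    have h1 : wl.map Prod.fst = s.map pvIdx := by
      rw [hwl, List.map_map]
      show s.zipIdx.map (fun p => pvIdx p.1) = s.map pvIdx
      rw [show (fun p : (String × Int × Int × Int) × Nat => pvIdx p.1) = pvIdx ∘ Prod.fst from rfl,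
        ← List.map_map, List.zipIdx_map_fst]
    have h3 : d.map pvIdx = List.range n := by
      rw [hd, List.map_map]
      have h4 : (pvIdx ∘ pvEntry names homes grades) = id := by
        funext j; exact hidxe j
      rw [h4, List.map_id]
    have h5 : (wl.map Prod.fst).Perm (List.range n) := by
      rw [h1, ← h3]
      exact hperm.map pvIdx
    exact h5.nodup_iff.mpr List.nodup_range
  -- B's keys agree with A's keys on entries
  have hkeyB : ∀ i : Nat, pvKeyB names homes grades i = pvKeyA (pvEntry names homes grades i) := by
    intro i
    simp [pvKeyA, pvKeyB, pvEntry, pow_two]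
  -- the count B computes at index i equals the position of entry i in s
  have hcount : ∀ (i p : Nat) (hpn : p < s.length), s[p]'hpn = pvEntry names homes grades i →
      ((List.range n).filter (fun j =>
        decide (pvFull (pvEntry names homes grades j) < pvFull (pvEntry names homes grades i)))).length
      = p := by
    intro i p hpn hsp
    rw [← List.countP_eq_length_filter]
    have h1 : (List.range n).countP (fun j =>
        decide (pvFull (pvEntry names homes grades j) < pvFull (pvEntry names homes grades i)))
        = d.countP (fun y => decide (pvFull y < pvFull (pvEntry names homes grades i))) := by
      rw [hd, List.countP_map]; rfl
    rw [h1, ← hperm.countP_eq]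
    exact pv_countP_pos s hpair p hpn _ hsp
  -- B, in entry form
  have haltR : solution_alt names homes grades
      = (List.range n).map (fun i => (1 : Int) +
          (((List.range n).filter (fun j =>
            decide (pvFull (pvEntry names homes grades j) < pvFull (pvEntry names homes grades i)))).length : Int)) := by
    show (List.range n).map (fun i =>
      (1 : Int) + ((((List.range n).filter (fun j =>
        decide (toLex (((List.range n).map (pvKeyB names homes grades)).getD j (toLex (0, toLex (0, ""))), j)
              < toLex (((List.range n).map (pvKeyB names homes grades)).getD i (toLex (0, toLex (0, ""))), i)))).length : Int))) = _
    apply List.map_congr_left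
    intro i hi
    have hin : i < n := List.mem_range.mp hi
    congr 2
    congr 1
    apply List.filter_congr
    intro j hj
    have hjn : j < n := List.mem_range.mp hj
    have hget : ∀ m : Nat, m < n →
        ((List.range n).map (pvKeyB names homes grades)).getD m (toLex (0, toLex (0, "")))
          = pvKeyA (pvEntry names homes grades m) := by
      intro m hm
      rw [List.getD_eq_getElem _ _ (by simpa using hm), List.getElem_map]
      rw [hkeyB]
      simp
    rw [hget j hjn, hget i hin]
    have hfj : toLex (pvKeyA (pvEntry names homes grades j), j)
        = pvFull (pvEntry names homes grades j) := by rw [pvFull, hidxe]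
    have hfi : toLex (pvKeyA (pvEntry names homes grades i), i)
        = pvFull (pvEntry names homes grades i) := by rw [pvFull, hidxe]
    rw [hfj, hfi]
  rw [hA, hstep2, haltR]
  apply List.ext_getElem
  · rw [pv_setfold_length, List.length_replicate, List.length_map, List.length_range]
  · intro i h1 h2
    have hin : i < n := by
      rw [pv_setfold_length, List.length_replicate] at h1
      exact h1
    have hmem : pvEntry names homes grades i ∈ s := by
      rw [hperm.mem_iff, hd]
      exact List.mem_map_of_mem (List.mem_range.mpr hin)
    rcases List.mem_iff_getElem.mp hmem with ⟨p, hpn, hsp⟩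
    have hlw : (i, (p : Int) + 1) ∈ wl := by
      rw [hwl]
      refine List.mem_map.mpr ⟨(s[p], p), ?_, ?_⟩
      · exact List.mem_iff_getElem.mpr ⟨p, by simpa using hpn, by simp [List.getElem_zipIdx]⟩
      · simp [hsp, hidxe]
    have hlen : i < (List.replicate n (0 : Int)).length := by simpa using hin
    have hL : (wl.foldl (fun a p => a.set p.1 p.2) (List.replicate n (0 : Int))).getD i 0
        = (p : Int) + 1 := pv_setfold_mem wl _ i _ 0 hwlnodup hlw hlen
    rw [← List.getD_eq_getElem _ 0 h1, hL]
    rw [List.getElem_map, List.getElem_range, hcount i p hpn hsp]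
    omega

-- ===== VERDICT (by name: the statement is the Claim_ definition above) =====
theorem solution_spec : Claim_equal_solution := by
  intro names homes grades _ _
  exact solution_spec_aux names homes grades
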